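-- pv_equiv track=rewrite | github.com/networkoptix/tools | util/junkshop-fails.py | enum_urls
-- ===== SOURCE A (Python) =====
-- SOURCE_URL='https://junkshop.lan.hdw.mx/api/get_fails?draw=2&columns%5B0%5D%5Bdata%5D=name&columns%5B0%5D%5Bname%5D=&columns%5B0%5D%5Bsearchable%5D=true&columns%5B0%5D%5Borderable%5D=true&columns%5B0%5D%5Bsearch%5D%5Bvalue%5D=&columns%5B0%5D%5Bsearch%5D%5Bregex%5D=false&columns%5B1%5D%5Bdata%5D=last_build&columns%5B1%5D%5Bname%5D=&columns%5B1%5D%5Bsearchable%5D=false&columns%5B1%5D%5Borderable%5D=false&columns%5B1%5D%5Bsearch%5D%5Bvalue%5D=&columns%5B1%5D%5Bsearch%5D%5Bregex%5D=false&columns%5B2%5D%5Bdata%5D=last_fail&columns%5B2%5D%5Bname%5D=&columns%5B2%5D%5Bsearchable%5D=false&columns%5B2%5D%5Borderable%5D=true&columns%5B2%5D%5Bsearch%5D%5Bvalue%5D=&columns%5B2%5D%5Bsearch%5D%5Bregex%5D=false&columns%5B3%5D%5Bdata%5D=first_build&columns%5B3%5D%5Bname%5D=&columns%5B3%5D%5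Bsearchable%5D=false&columns%5B3%5D%5Borderable%5D=false&columns%5B3%5D%5Bsearch%5D%5Bvalue%5D=&columns%5B3%5D%5Bsearch%5D%5Bregex%5D=false&columns%5B4%5D%5Bdata%5D=first_fail&columns%5B4%5D%5Bname%5D=&columns%5B4%5D%5Bsearchable%5D=false&columns%5B4%5D%5Borderable%5D=true&columns%5B4%5D%5Bsearch%5D%5Bvalue%5D=&columns%5B4%5D%5Bsearch%5D%5Bregex%5D=false&columns%5B5%5D%5Bdata%5D=count&columns%5B5%5D%5Bname%5D=&columns%5B5%5D%5Bsearchable%5D=false&columns%5B5%5D%5Borderable%5D=true&columns%5B5%5D%5Bsearch%5D%5Bvalue%5D=&columns%5B5%5D%5Bsearch%5D%5Bregex%5D=false&order%5B0%5D%5Bcolumn%5D=5&order%5B0%5D%5Bdir%5D=desc&start=0&length=20&search%5Bvalue%5D=&search%5Bregex%5D=false&csrf_token=ImNmMzYxNThkNTViMmMyZDMwYTFiYzBlYTc5MTAwODVjZTZmYWFiZTMi.YzMbMg.rLSg_uM4WHqhxm9Y9bVSE2kwRPU&project=gitlab&branch=master&platform=linux-x64&test_bundle=unit&date_from=2022+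Sep+20&date_to=2022+Sep+27&_=1664293683789'
--
-- LABEL_URL='https://junkshop.lan.hdw.mx/fails?project=develop&platform=linux-x64&branch=master'
--
-- SOURCE_VARIANTS = [{
--     '=master': '=master',
--     '=vms_5.1': '=master',
--     '=vms_5.0_patch': '=master',
-- }, {
--     "=linux-x64": "=linux-x64",
--     "=windows-x64": "=linux-x64",
-- }]
--
-- def enum_urls(source_template=SOURCE_URL, label_template=LABEL_URL, variants=SOURCE_VARIANTS):
--     if len(variants) == 0:
--         yield (label_template, source_template)
--         return
--     first_variants, *tail_variants = variants
--     for k, v in first_variants.items():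
--         source = source_template.replace(v, k)
--         label = label_template.replace(v, k)
--         for childK, childV in enum_urls(source, label, tail_variants):
--             yield (childK, childV)
-- ===== SOURCE B (Python) =====
-- import itertools
--
-- SOURCE_URL='https://junkshop.lan.hdw.mx/api/get_fails?draw=2&columns%5B0%5D%5Bdata%5D=name&columns%5B0%5D%5Bname%5D=&columns%5B0%5D%5Bsearchable%5D=true&columns%5B0%5D%5Borderable%5D=true&columns%5B0%5D%5Bsearch%5D%5Bvalue%5D=&columns%5B0%5D%5Bsearch%5D%5Bregex%5D=false&columns%5B1%5D%5Bdata%5D=last_build&columns%5B1%5D%5Bname%5D=&columns%5B1%5D%5Bsearchable%5D=false&columns%5B1%5D%5Borderable%5D=false&columns%5B1%5D%5Bsearch%5D%5Bvalue%5D=&columns%5B1%5D%5Bsearch%5D%5Bregex%5D=false&columns%5B2%5D%5Bdata%5D=last_fail&columns%5B2%5D%5Bname%5D=&columns%5B2%5D%5Bsearchable%5D=false&columns%5B2%5D%5Borderable%5D=true&columns%5B2%5D%5Bsearch%5D%5Bvalue%5D=&columns%5B2%5D%5Bsearch%5D%5Bregex%5D=false&columns%5B3%5D%5Bdata%5D=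first_build&columns%5B3%5D%5Bname%5D=&columns%5B3%5D%5Bsearchable%5D=false&columns%5B3%5D%5Borderable%5D=false&columns%5B3%5D%5Bsearch%5D%5Bvalue%5D=&columns%5B3%5D%5Bsearch%5D%5Bregex%5D=false&columns%5B4%5D%5Bdata%5D=first_fail&columns%5B4%5D%5Bname%5D=&columns%5B4%5D%5Bsearchable%5D=false&columns%5B4%5D%5Borderable%5D=true&columns%5B4%5D%5Bsearch%5D%5Bvalue%5D=&columns%5B4%5D%5Bsearch%5D%5Bregex%5D=false&columns%5B5%5D%5Bdata%5D=count&columns%5B5%5D%5Bname%5D=&columns%5B5%5D%5Bsearchable%5D=false&columns%5B5%5D%5Borderable%5D=true&columns%5B5%5D%5Bsearch%5D%5Bvalue%5D=&columns%5B5%5D%5Bsearch%5D%5Bregex%5D=false&order%5B0%5D%5Bcolumn%5D=5&order%5B0%5D%5Bdir%5D=desc&start=0&length=20&search%5Bvalue%5D=&search%5Bregex%5D=false&csrf_token=ImNmMzYxNThkNTViMmMyZDMwYTFiYzBlYTc5MTAwODVjZTZmYWFiZTMi.YzMbMg.rLSg_uM4WHqhxm9Y9bVSE2kwRPU&project=g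itlab&branch=master&platform=linux-x64&test_bundle=unit&date_from=2022+Sep+20&date_to=2022+Sep+27&_=1664293683789'
--
-- LABEL_URL='https://junkshop.lan.hdw.mx/fails?project=develop&platform=linux-x64&branch=master'
--
-- SOURCE_VARIANTS = [{
--     '=master': '=master',
--     '=vms_5.1': '=master',
--     '=vms_5.0_patch': '=master',
-- }, {
--     "=linux-x64": "=linux-x64",
--     "=windows-x64": "=linux-x64",
-- }]
--
-- def enum_urls(source_template=SOURCE_URL, label_template=LABEL_URL, variants=SOURCE_VARIANTS):
--     for combo in itertools.product(*[list(d.items()) for d in variants]):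
--         source, label = source_template, label_template
--         for k, v in combo:
--             source = source.replace(v, k)
--             label = label.replace(v, k)
--         yield (label, source)
-- ===== Notes on version B (the rewrite author's own statement) =====
-- stated objective: alternative
-- what changed: Replaces A's nested recursive generator with itertools.product over the variant dicts' item lists plus a single left fold of replacements per combination; recursion disappears entirely.
import Mathlib
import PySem

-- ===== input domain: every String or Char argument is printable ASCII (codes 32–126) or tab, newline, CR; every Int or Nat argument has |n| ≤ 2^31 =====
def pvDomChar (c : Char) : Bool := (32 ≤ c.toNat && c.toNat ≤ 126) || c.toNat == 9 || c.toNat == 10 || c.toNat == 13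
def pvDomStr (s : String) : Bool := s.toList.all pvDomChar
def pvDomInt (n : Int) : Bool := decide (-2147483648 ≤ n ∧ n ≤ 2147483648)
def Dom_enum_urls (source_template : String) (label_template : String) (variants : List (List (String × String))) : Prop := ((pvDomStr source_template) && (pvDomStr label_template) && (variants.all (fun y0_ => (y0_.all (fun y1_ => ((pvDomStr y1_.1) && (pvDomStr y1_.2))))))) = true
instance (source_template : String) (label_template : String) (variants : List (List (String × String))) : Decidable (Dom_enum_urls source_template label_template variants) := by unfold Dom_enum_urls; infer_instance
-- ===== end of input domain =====

-- B: itertools.product over the variant dicts' items, then one fold of replacements per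
-- combination — a flat product-then-fold decomposition instead of A's nested recursion
-- (objective: alternative). A is a generator; equivalence is about the yielded sequence.

-- ===== PORT A =====
def enum_urls (source_template : String) (label_template : String) (variants : List (List (String × String))) : List (String × String) :=
  match variants with
  | [] => [(label_template, source_template)]
  | first_variants :: tail_variants =>
    first_variants.flatMap (fun kv =>
      let source := PySem.Str.replace source_template kv.2 kv.1
      let label := PySem.Str.replace label_template kv.2 kv.1
      enum_urls source label tail_variants)

-- ===== PORT B =====
-- itertools.product over the item lists (leftmost factor varies slowest)
def pvProduct (ls : List (List (String × String))) : List (List (String × String)) :=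
  match ls with
  | [] => [[]]
  | xs :: rest => xs.flatMap (fun x => (pvProduct rest).map (fun c => x :: c))

def enum_urls_alt (source_template : String) (label_template : String) (variants : List (List (String × String))) : List (String × String) :=
  (pvProduct variants).map (fun combo =>
    let p := combo.foldl
      (fun (sl : String × String) kv =>
        (PySem.Str.replace sl.1 kv.2 kv.1, PySem.Str.replace sl.2 kv.2 kv.1))
      (source_template, label_template)
    (p.2, p.1))

-- ===== PRECONDITION & SPEC =====
def Spec_enum_urls (source_template : String) (label_template : String) (variants : List (List (String × String))) (out : List (String × String)) : Prop := out = enum_urls_alt source_template label_template variants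
instance (source_template : String) (label_template : String) (variants : List (List (String × String))) (out : List (String × String)) : Decidable (Spec_enum_urls source_template label_template variants out) := by unfold Spec_enum_urls; infer_instance

-- ===== CLAIM (what is proved, stated in full; the proofs are below) =====
def Claim_equal_enum_urls : Prop := ∀ (source_template : String) (label_template : String) (variants : List (List (String × String))), Dom_enum_urls source_template label_template variants → Spec_enum_urls source_template label_template variants (enum_urls source_template label_template variants)

-- ===== LEMMAS AND PROOFS =====
theorem enum_urls_eq_alt (variants : List (List (String × String))) :
    ∀ (s l : String), enum_urls s l variants = enum_urls_alt s l variants := by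
  induction variants with
  | nil => intro s l; rfl
  | cons first tail ih =>
    intro s l
    simp only [enum_urls, ih, enum_urls_alt, pvProduct, List.map_flatMap, List.map_map,
      Function.comp_def, List.foldl_cons]

-- ===== VERDICT (by name: the statement is the Claim_ definition above) =====
theorem enum_urls_spec : Claim_equal_enum_urls := by
  intro s l v _
  exact enum_urls_eq_alt v s l
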